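-- pv_equiv track=rewrite | github.com/alikoraykoc/ct2xfasta | src/ct2xfasta/parsers.py | _pairs_to_dotbracket
-- ===== SOURCE A (Python) =====
-- def _pairs_to_dotbracket(pairs: list) -> str:
--     n = len(pairs)
--     dot = ["." for _ in range(n)]
--     for i, pair in enumerate(pairs, start=1):
--         if pair > 0 and i < pair <= n:
--             dot[i - 1] = "("
--             if dot[pair - 1] == ".":
--                 dot[pair - 1] = ")"
--     return "".join(dot)
-- ===== SOURCE B (Python) =====
-- def _pairs_to_dotbracket(pairs: list) -> str:
--     n = len(pairs)
--     opens = {i for i in range(1, n + 1) if pairs[i - 1] > 0 and i < pairs[i - 1] <= n}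
--     closers = {pairs[i - 1] for i in opens}
--     return "".join("(" if p in opens else ")" if p in closers else "." for p in range(1, n + 1))
-- ===== Notes on version B (the rewrite author's own statement) =====
-- stated objective: simpler
-- what changed: Replaced A's in-place list mutation with overwrite/only-if-dot semantics by first computing the opener and closer position sets with two comprehensions and then rendering each position independently in one pass.
import Mathlib
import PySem

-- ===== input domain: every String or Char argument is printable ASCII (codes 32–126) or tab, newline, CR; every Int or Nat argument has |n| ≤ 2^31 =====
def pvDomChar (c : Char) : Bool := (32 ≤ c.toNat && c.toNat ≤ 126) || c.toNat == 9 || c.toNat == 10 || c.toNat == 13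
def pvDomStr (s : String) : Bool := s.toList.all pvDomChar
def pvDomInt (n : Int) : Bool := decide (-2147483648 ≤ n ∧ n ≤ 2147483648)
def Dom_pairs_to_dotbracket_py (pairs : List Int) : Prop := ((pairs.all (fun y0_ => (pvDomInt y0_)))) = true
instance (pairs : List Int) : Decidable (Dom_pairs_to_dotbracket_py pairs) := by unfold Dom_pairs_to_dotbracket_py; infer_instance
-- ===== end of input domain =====

-- B replaces A's mutate-in-place loop by two set comprehensions (opens / closers)
-- and one per-position rendering pass; objective: simpler, same O(n) cost.

-- ===== PORT A =====
-- literal port of _pairs_to_dotbracket: a '.'-filled list mutated in place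
def pairs_to_dotbracket_py (pairs : List Int) : String :=
  let n : Int := pairs.length
  let dot : List Char := List.replicate pairs.length '.'
  let dot := (PySem.List.enumerate pairs 1).foldl (fun dot ip =>
      let i := ip.1
      let pair := ip.2
      if pair > 0 ∧ i < pair ∧ pair ≤ n then
        let dot := PySem.List.pySetD dot (i - 1) '('
        if PySem.List.pyGetD dot (pair - 1) ' ' = '.' then
          PySem.List.pySetD dot (pair - 1) ')'
        else dot
      else dot) dot
  String.mk dot

-- ===== PORT B =====
-- literal port of Source B: opens / closers sets, then one rendering pass
def pairs_to_dotbracket_py_alt (pairs : List Int) : String :=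
  let n : Int := pairs.length
  let opens : PySem.Set Int := PySem.Set.ofList ((PySem.List.pyRange 1 (n + 1) 1).filter
      (fun i => decide (PySem.List.pyGetD pairs (i - 1) 0 > 0 ∧
        i < PySem.List.pyGetD pairs (i - 1) 0 ∧ PySem.List.pyGetD pairs (i - 1) 0 ≤ n)))
  let closers : PySem.Set Int := PySem.Set.ofList (opens.map (fun i => PySem.List.pyGetD pairs (i - 1) 0))
  String.mk ((PySem.List.pyRange 1 (n + 1) 1).map (fun p =>
      if PySem.Set.contains opens p then '('
      else if PySem.Set.contains closers p then ')'
      else '.'))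

-- ===== PRECONDITION & SPEC =====
def Spec_pairs_to_dotbracket_py (pairs : List Int) (out : String) : Prop := out = pairs_to_dotbracket_py_alt pairs
instance (pairs : List Int) (out : String) : Decidable (Spec_pairs_to_dotbracket_py pairs out) := by unfold Spec_pairs_to_dotbracket_py; infer_instance

-- ===== CLAIM (what is proved, stated in full; the proofs are below) =====
def Claim_equal_pairs_to_dotbracket_py : Prop := ∀ (pairs : List Int), Dom_pairs_to_dotbracket_py pairs → Spec_pairs_to_dotbracket_py pairs (pairs_to_dotbracket_py pairs)

-- ===== LEMMAS AND PROOFS =====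

-- pairs[i-1] for a 1-based position i
def pvGet (pairs : List Int) (i : Int) : Int := PySem.List.pyGetD pairs (i - 1) 0

-- "position i is an opener"
def pvOpen (pairs : List Int) (i : Int) : Bool :=
  decide (0 < pvGet pairs i ∧ i < pvGet pairs i ∧ pvGet pairs i ≤ (pairs.length : Int))

-- "0-based position k is the target of some opener among the first m positions"
def pvCloser (pairs : List Int) (m k : Nat) : Bool :=
  (List.range m).any (fun j => pvOpen pairs (j + 1) && (pvGet pairs (j + 1) == (k : Int) + 1))

-- the character at 0-based position k after the first m loop iterations of A
def pvCharAt (pairs : List Int) (m k : Nat) : Char :=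
  if pvOpen pairs ((k : Int) + 1) && decide (k + 1 ≤ m) then '('
  else if pvCloser pairs m k then ')'
  else '.'

theorem pvCharAt_zero (pairs : List Int) (k : Nat) : pvCharAt pairs 0 k = '.' := by
  simp [pvCharAt, pvCloser]

-- characters produced by pvCharAt when position m opens pair (step lemmas)
theorem pvCharAt_succ_self (pairs : List Int) (m : Nat) (hc : pvOpen pairs ((m : Int) + 1) = true) :
    pvCharAt pairs (m + 1) m = '(' := by
  simp [pvCharAt, hc]

theorem pvCharAt_succ_target (pairs : List Int) (m q : Nat)
    (hc : pvOpen pairs ((m : Int) + 1) = true) (hg : pvGet pairs ((m : Int) + 1) = (q : Int) + 1)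
    (hq : m + 1 ≤ q) : pvCharAt pairs (m + 1) q = ')' := by
  unfold pvCharAt
  have h1 : ¬ (q + 1 ≤ m + 1) := by omega
  have h2 : pvCloser pairs (m + 1) q = true := by
    unfold pvCloser
    rw [List.any_eq_true]
    exact ⟨m, by simp, by simp [hc, hg]⟩
  simp [h1, h2]

theorem pvCharAt_succ_other (pairs : List Int) (m k : Nat)
    (h : pvOpen pairs ((m : Int) + 1) = false ∨ (k ≠ m ∧ pvGet pairs ((m : Int) + 1) ≠ (k : Int) + 1)) :
    pvCharAt pairs (m + 1) k = pvCharAt pairs m k := by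
  unfold pvCharAt
  have hcl : pvCloser pairs (m + 1) k = pvCloser pairs m k := by
    unfold pvCloser
    rw [List.range_succ, List.any_append]
    have : (List.any [m] fun j => pvOpen pairs (↑j + 1) && (pvGet pairs (↑j + 1) == (k : Int) + 1)) = false := by
      rcases h with h | ⟨_, h⟩ <;> simp [h]
    rw [this, Bool.or_false]
  rw [hcl]
  rcases h with h | ⟨hk, _⟩
  · by_cases hkm : k = m
    · subst hkm; simp [h]
    · rw [decide_eq_decide.mpr (show (k + 1 ≤ m + 1) ↔ (k + 1 ≤ m) by omega)]
  · rw [decide_eq_decide.mpr (show (k + 1 ≤ m + 1) ↔ (k + 1 ≤ m) by omega)]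

theorem pv_step (pairs : List Int) (m : Nat) (pair : Int) (hm : m < pairs.length)
    (hg : pvGet pairs ((m : Int) + 1) = pair) :
    (if pair > 0 ∧ ((m : Int) + 1) < pair ∧ pair ≤ (pairs.length : Int) then
      let dot := PySem.List.pySetD ((List.range pairs.length).map (pvCharAt pairs m)) ((m : Int) + 1 - 1) '('
      if PySem.List.pyGetD dot (pair - 1) ' ' = '.' then
        PySem.List.pySetD dot (pair - 1) ')'
      else dot
    else (List.range pairs.length).map (pvCharAt pairs m))
    = (List.range pairs.length).map (pvCharAt pairs (m + 1)) := by
  by_cases hc : pair > 0 ∧ ((m : Int) + 1) < pair ∧ pair ≤ (pairs.length : Int)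
  · rw [if_pos hc]
    obtain ⟨h1, h2, h3⟩ := hc
    have hopen : pvOpen pairs ((m : Int) + 1) = true := by
      unfold pvOpen; rw [hg]; exact decide_eq_true ⟨h1, h2, h3⟩
    obtain ⟨q, hq1⟩ : ∃ q : Nat, (q : Int) = pair - 1 :=
      ⟨(pair - 1).toNat, Int.toNat_of_nonneg (by omega)⟩
    have hq2 : m + 1 ≤ q := by omega
    have hq3 : q < pairs.length := by omega
    have hgq : pvGet pairs ((m : Int) + 1) = (q : Int) + 1 := by rw [hg]; omega
    rw [show ((m : Int) + 1 - 1) = ((m : Nat) : Int) from by ring, PySem.List.pySetD_natCast]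
    show (if PySem.List.pyGetD ((List.map (pvCharAt pairs m) (List.range pairs.length)).set m '(') (pair - 1) ' ' = '.' then
        PySem.List.pySetD ((List.map (pvCharAt pairs m) (List.range pairs.length)).set m '(') (pair - 1) ')'
      else (List.map (pvCharAt pairs m) (List.range pairs.length)).set m '(') = _
    have hgetq : PySem.List.pyGetD ((List.map (pvCharAt pairs m) (List.range pairs.length)).set m '(') (pair - 1) ' '
        = pvCharAt pairs m q := by
      rw [← hq1, PySem.List.pyGetD_natCast, List.getD_eq_getElem _ _ (by simpa using hq3)]
      rw [List.getElem_set_ne (by omega)]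
      simp
    rw [hgetq]
    have hform : pvCharAt pairs m q = (if pvCloser pairs m q then ')' else '.') := by
      unfold pvCharAt
      rw [decide_eq_false (show ¬ (q + 1 ≤ m) by omega)]
      simp
    have htarget : ∀ k, k < pairs.length → pvCharAt pairs (m + 1) k =
        (if k = m then '(' else if k = q then ')' else pvCharAt pairs m k) := by
      intro k hk
      by_cases e1 : k = m
      · rw [if_pos e1, e1]; exact pvCharAt_succ_self pairs m hopen
      · rw [if_neg e1]
        by_cases e2 : k = q
        · rw [if_pos e2, e2]; exact pvCharAt_succ_target pairs m q hopen hgq hq2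
        · rw [if_neg e2]
          exact pvCharAt_succ_other pairs m k (Or.inr ⟨e1, by rw [hgq]; intro hx; exact e2 (by omega)⟩)
    by_cases hdot : pvCharAt pairs m q = '.'
    · rw [if_pos hdot, ← hq1, PySem.List.pySetD_natCast]
      apply List.ext_getElem (by simp)
      intro k hk1 hk2
      have hk : k < pairs.length := by simpa using hk2
      simp only [List.getElem_set, List.getElem_map, List.getElem_range, htarget k hk]
      split_ifs <;> first | rfl | omega
    · rw [if_neg hdot]
      have hclq : pvCharAt pairs m q = ')' := by
        rw [hform]
        rw [hform] at hdot
        split_ifs with hcl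
        · rfl
        · rw [if_neg hcl] at hdot; exact absurd rfl hdot
      apply List.ext_getElem (by simp)
      intro k hk1 hk2
      have hk : k < pairs.length := by simpa using hk2
      simp only [List.getElem_set, List.getElem_map, List.getElem_range, htarget k hk]
      by_cases e1 : k = m
      · simp [e1]
      · rw [if_neg (fun h => e1 h.symm), if_neg e1]
        by_cases e2 : k = q
        · rw [if_pos e2, e2, hclq]
        · rw [if_neg e2]
  · rw [if_neg hc]
    have hopen : pvOpen pairs ((m : Int) + 1) = false := by
      unfold pvOpen; rw [hg]; exact decide_eq_false hc
    apply List.map_congr_left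
    intro k _
    exact (pvCharAt_succ_other pairs m k (Or.inl hopen)).symm

theorem pv_fold_inv (pairs : List Int) :
    ∀ (rest : List Int) (m : Nat), pairs.drop m = rest →
    ((PySem.List.enumerate rest ((m : Int) + 1)).foldl (fun dot ip =>
      let i := ip.1
      let pair := ip.2
      if pair > 0 ∧ i < pair ∧ pair ≤ (pairs.length : Int) then
        let dot := PySem.List.pySetD dot (i - 1) '('
        if PySem.List.pyGetD dot (pair - 1) ' ' = '.' then
          PySem.List.pySetD dot (pair - 1) ')'
        else dot
      else dot)
      ((List.range pairs.length).map (pvCharAt pairs m)))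
    = (List.range pairs.length).map (pvCharAt pairs (m + rest.length)) := by
  intro rest
  induction rest with
  | nil => intro m _; simp [PySem.List.enumerate]
  | cons pair rest' ih =>
    intro m h
    have hm : m < pairs.length := by
      by_contra hx
      push_neg at hx
      rw [List.drop_eq_nil_of_le hx] at h
      simp at h
    have hget : pairs[m]? = some pair := by
      have h0 := congrArg (fun l => l[0]?) h
      simpa using h0
    have hpg : pvGet pairs ((m : Int) + 1) = pair := by
      unfold pvGet
      rw [show ((m : Int) + 1 - 1) = ((m : Nat) : Int) from by ring, PySem.List.pyGetD_natCast,
        List.getD_eq_getElem?_getD, hget]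
      rfl
    have hdrop : pairs.drop (m + 1) = rest' := by
      have h1 := congrArg (List.drop 1) h
      rw [List.drop_drop] at h1
      simpa [Nat.add_comm] using h1
    rw [PySem.List.enumerate_cons, List.foldl_cons]
    have hstep := pv_step pairs m pair hm hpg
    have ih2 := ih (m + 1) hdrop
    rw [show ((m : Int) + 1 + 1) = (((m + 1 : Nat) : Int) + 1) from by push_cast; ring]
    simp only [] at *
    rw [hstep, ih2]
    congr 2
    simp
    omega

theorem pvA_char (pairs : List Int) :
    pairs_to_dotbracket_py pairs = String.mk ((List.range pairs.length).map (pvCharAt pairs pairs.length)) := by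
  have hinit : List.replicate pairs.length '.' = (List.range pairs.length).map (pvCharAt pairs 0) := by
    symm
    rw [List.eq_replicate_iff]
    refine ⟨by simp, ?_⟩
    intro c hc
    rcases List.mem_map.mp hc with ⟨k, _, hk⟩
    rw [← hk, pvCharAt_zero]
  have h := pv_fold_inv pairs pairs 0 (by simp)
  simp only [Nat.cast_zero, zero_add] at h
  rw [← hinit] at h
  exact congrArg String.mk h

theorem pvB_memL (pairs : List Int) (x : Int) :
    x ∈ (List.map (fun (k : Nat) => (1 : Int) + (k : Int)) (List.range pairs.length)).filter
      (fun i => decide (PySem.List.pyGetD pairs (i - 1) 0 > 0 ∧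
        i < PySem.List.pyGetD pairs (i - 1) 0 ∧ PySem.List.pyGetD pairs (i - 1) 0 ≤ (pairs.length : Int)))
    ↔ (1 ≤ x ∧ x < (pairs.length : Int) + 1 ∧ pvOpen pairs x = true) := by
  rw [List.mem_filter]
  have hmem : x ∈ List.map (fun (k : Nat) => (1 : Int) + (k : Int)) (List.range pairs.length) ↔
      (1 ≤ x ∧ x < (pairs.length : Int) + 1) := by
    simp only [List.mem_map, List.mem_range]
    constructor
    · rintro ⟨k, hk, rfl⟩; omega
    · rintro ⟨h1, h2⟩; exact ⟨(x - 1).toNat, by omega, by omega⟩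
  rw [hmem]
  unfold pvOpen pvGet
  simp only [decide_eq_true_iff]
  tauto

theorem pvB_elem (pairs : List Int) (k : Nat) (hk : k < pairs.length) :
    (if PySem.Set.contains (PySem.Set.ofList ((List.map (fun (k : Nat) => (1 : Int) + (k : Int)) (List.range pairs.length)).filter
      (fun i => decide (PySem.List.pyGetD pairs (i - 1) 0 > 0 ∧
        i < PySem.List.pyGetD pairs (i - 1) 0 ∧ PySem.List.pyGetD pairs (i - 1) 0 ≤ (pairs.length : Int))))) (1 + (k : Int)) then '('
     else if PySem.Set.contains (PySem.Set.ofList ((PySem.Set.ofList ((List.map (fun (k : Nat) => (1 : Int) + (k : Int)) (List.range pairs.length)).filter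
      (fun i => decide (PySem.List.pyGetD pairs (i - 1) 0 > 0 ∧
        i < PySem.List.pyGetD pairs (i - 1) 0 ∧ PySem.List.pyGetD pairs (i - 1) 0 ≤ (pairs.length : Int))))).map
          (fun i => PySem.List.pyGetD pairs (i - 1) 0))) (1 + (k : Int)) then ')'
     else '.')
    = pvCharAt pairs pairs.length k := by
  have hopen : (PySem.Set.contains (PySem.Set.ofList ((List.map (fun (k : Nat) => (1 : Int) + (k : Int)) (List.range pairs.length)).filter
      (fun i => decide (PySem.List.pyGetD pairs (i - 1) 0 > 0 ∧
        i < PySem.List.pyGetD pairs (i - 1) 0 ∧ PySem.List.pyGetD pairs (i - 1) 0 ≤ (pairs.length : Int))))) (1 + (k : Int)) = true)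
      ↔ (pvOpen pairs ((k : Int) + 1) = true) := by
    rw [PySem.Set.contains_iff, PySem.Set.mem_ofList, pvB_memL]
    constructor
    · rintro ⟨_, _, h⟩
      rwa [add_comm] at h
    · intro h
      exact ⟨by omega, by omega, by rwa [add_comm]⟩
  have hclose : (PySem.Set.contains (PySem.Set.ofList ((PySem.Set.ofList ((List.map (fun (k : Nat) => (1 : Int) + (k : Int)) (List.range pairs.length)).filter
      (fun i => decide (PySem.List.pyGetD pairs (i - 1) 0 > 0 ∧
        i < PySem.List.pyGetD pairs (i - 1) 0 ∧ PySem.List.pyGetD pairs (i - 1) 0 ≤ (pairs.length : Int))))).map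
        (fun i => PySem.List.pyGetD pairs (i - 1) 0))) (1 + (k : Int)) = true)
      ↔ (pvCloser pairs pairs.length k = true) := by
    rw [PySem.Set.contains_iff, PySem.Set.mem_ofList, List.mem_map]
    unfold pvCloser
    rw [List.any_eq_true]
    constructor
    · rintro ⟨i, hi, hgi⟩
      rw [PySem.Set.mem_ofList, pvB_memL] at hi
      obtain ⟨hi1, hi2, hio⟩ := hi
      refine ⟨(i - 1).toNat, List.mem_range.mpr (by omega), ?_⟩
      have hcast : (((i - 1).toNat : Nat) : Int) + 1 = i := by omega
      rw [hcast, Bool.and_eq_true, beq_iff_eq]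
      refine ⟨hio, ?_⟩
      unfold pvGet
      rw [show (i - 1 : Int) = i - 1 from rfl]
      have hgi' : PySem.List.pyGetD pairs (i - 1) 0 = 1 + (k : Int) := hgi
      rw [hgi']
      ring
    · rintro ⟨j, hj, hb⟩
      rw [List.mem_range] at hj
      rw [Bool.and_eq_true, beq_iff_eq] at hb
      obtain ⟨hox, hgx⟩ := hb
      unfold pvGet at hgx
      refine ⟨(j : Int) + 1, ?_, ?_⟩
      · rw [PySem.Set.mem_ofList, pvB_memL]
        exact ⟨by omega, by omega, hox⟩
      · show PySem.List.pyGetD pairs ((j : Int) + 1 - 1) 0 = 1 + (k : Int)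
        rw [hgx]
        ring
  simp only [hopen, hclose]
  unfold pvCharAt
  rw [decide_eq_true (show k + 1 ≤ pairs.length by omega), Bool.and_true]

theorem pvB_char (pairs : List Int) :
    pairs_to_dotbracket_py_alt pairs = String.mk ((List.range pairs.length).map (pvCharAt pairs pairs.length)) := by
  have hlist : ((PySem.List.pyRange 1 ((pairs.length : Int) + 1) 1).map (fun p =>
      if PySem.Set.contains (PySem.Set.ofList ((PySem.List.pyRange 1 ((pairs.length : Int) + 1) 1).filter
      (fun i => decide (PySem.List.pyGetD pairs (i - 1) 0 > 0 ∧
        i < PySem.List.pyGetD pairs (i - 1) 0 ∧ PySem.List.pyGetD pairs (i - 1) 0 ≤ (pairs.length : Int))))) p then '('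
      else if PySem.Set.contains (PySem.Set.ofList ((PySem.Set.ofList ((PySem.List.pyRange 1 ((pairs.length : Int) + 1) 1).filter
      (fun i => decide (PySem.List.pyGetD pairs (i - 1) 0 > 0 ∧
        i < PySem.List.pyGetD pairs (i - 1) 0 ∧ PySem.List.pyGetD pairs (i - 1) 0 ≤ (pairs.length : Int))))).map
          (fun i => PySem.List.pyGetD pairs (i - 1) 0))) p then ')'
      else '.'))
      = (List.range pairs.length).map (pvCharAt pairs pairs.length) := by
    rw [PySem.List.pyRange_one]
    rw [show (((pairs.length : Int) + 1 - 1)).toNat = pairs.length from by simp]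
    rw [List.map_map]
    apply List.map_congr_left
    intro k hk
    simp only [Function.comp_apply]
    exact pvB_elem pairs k (List.mem_range.mp hk)
  exact congrArg String.mk hlist

-- ===== VERDICT (by name: the statement is the Claim_ definition above) =====
theorem pairs_to_dotbracket_py_spec : Claim_equal_pairs_to_dotbracket_py := by
  intro pairs _
  unfold Spec_pairs_to_dotbracket_py
  rw [pvA_char, pvB_char]
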